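-- pv_equiv track=rewrite | github.com/RBVI/ChimeraX | src/bundles/ihm/src/ihm.py | same_sphere_atoms
-- ===== SOURCE A (Python) =====
-- def same_sphere_atoms(mslist):
--     # Check if all sphere models have identical atoms in same order so that
--     # a coordinate set could be used to represent them.
--     sphere_ids = None
--     for model_id, sphere_list in mslist:
--         sids = [(asym_id,sb,se) for (asym_id, sb,se,xyz,r) in sphere_list]
--         if sphere_ids is None:
--             sphere_ids = sids
--         elif sids != sphere_ids:
--             return False
--     return True
-- ===== SOURCE B (Python) =====
-- def same_sphere_atoms(mslist):
--     # Check if all sphere models have identical atoms in same order so that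
--     # a coordinate set could be used to represent them.
--     projections = {tuple((asym_id, sb, se) for (asym_id, sb, se, xyz, r) in sphere_list)
--                    for model_id, sphere_list in mslist}
--     return len(projections) <= 1
-- ===== Notes on version B (the rewrite author's own statement) =====
-- stated objective: idiomatic
-- what changed: Replaces A's ordered first-element-and-compare scan with early return by a set comprehension collecting the distinct projected (asym_id, sb, se) id tuples across all sphere lists and testing that the set has at most one element.
import Mathlib
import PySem

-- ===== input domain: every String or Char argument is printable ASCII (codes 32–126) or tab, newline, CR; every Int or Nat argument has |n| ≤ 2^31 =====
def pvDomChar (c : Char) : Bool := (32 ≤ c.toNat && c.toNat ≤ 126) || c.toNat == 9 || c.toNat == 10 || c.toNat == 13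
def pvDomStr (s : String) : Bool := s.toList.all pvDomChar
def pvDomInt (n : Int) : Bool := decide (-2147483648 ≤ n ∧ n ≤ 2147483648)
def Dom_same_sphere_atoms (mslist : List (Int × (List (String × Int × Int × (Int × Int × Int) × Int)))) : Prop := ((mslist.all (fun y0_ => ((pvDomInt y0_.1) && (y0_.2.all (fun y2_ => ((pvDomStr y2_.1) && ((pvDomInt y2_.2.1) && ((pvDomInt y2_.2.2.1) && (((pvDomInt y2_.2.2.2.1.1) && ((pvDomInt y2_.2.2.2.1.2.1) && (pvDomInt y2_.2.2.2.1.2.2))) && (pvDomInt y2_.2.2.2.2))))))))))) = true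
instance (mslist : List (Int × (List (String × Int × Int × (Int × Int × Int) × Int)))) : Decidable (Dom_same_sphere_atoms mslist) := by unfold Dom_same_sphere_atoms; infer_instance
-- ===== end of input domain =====

-- B replaces A's first-and-compare scan with collecting the distinct projected id-lists
-- into a set and testing len <= 1 (objective: idiomatic; same cost).

-- ===== PORT A =====
-- [(asym_id, sb, se) for (asym_id, sb, se, xyz, r) in sphere_list]
def pvProj (sl : List (String × Int × Int × (Int × Int × Int) × Int)) : List (String × Int × Int) :=
  sl.map (fun t => (t.1, t.2.1, t.2.2.1))

-- the for-loop of A, with sphere_ids (None initially) as explicit state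
def pvLoopA (sphere_ids : Option (List (String × Int × Int)))
    : List (Int × (List (String × Int × Int × (Int × Int × Int) × Int))) → Bool
  | [] => true
  | (_, sphere_list) :: rest =>
      let sids := pvProj sphere_list
      match sphere_ids with
      | none => pvLoopA (some sids) rest
      | some s => if sids ≠ s then false else pvLoopA (some s) rest

def same_sphere_atoms (mslist : List (Int × (List (String × Int × Int × (Int × Int × Int) × Int)))) : Bool :=
  pvLoopA none mslist

-- ===== PORT B =====
def same_sphere_atoms_alt (mslist : List (Int × (List (String × Int × Int × (Int × Int × Int) × Int)))) : Bool :=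
  let projections : PySem.Set (List (String × Int × Int)) :=
    PySem.Set.ofList (mslist.map (fun m => pvProj m.2))
  decide (PySem.Set.len projections ≤ 1)

-- ===== PRECONDITION & SPEC =====
def Spec_same_sphere_atoms (mslist : List (Int × (List (String × Int × Int × (Int × Int × Int) × Int)))) (out : Bool) : Prop := out = same_sphere_atoms_alt mslist
instance (mslist : List (Int × (List (String × Int × Int × (Int × Int × Int) × Int)))) (out : Bool) : Decidable (Spec_same_sphere_atoms mslist out) := by unfold Spec_same_sphere_atoms; infer_instance

-- ===== CLAIM (what is proved, stated in full; the proofs are below) =====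
def Claim_equal_same_sphere_atoms : Prop := ∀ (mslist : List (Int × (List (String × Int × Int × (Int × Int × Int) × Int)))), Dom_same_sphere_atoms mslist → Spec_same_sphere_atoms mslist (same_sphere_atoms mslist)

-- ===== LEMMAS AND PROOFS =====

-- Set.add never shrinks
theorem pv_length_le_add {α : Type} [BEq α] (s : PySem.Set α) (x : α) :
    s.length ≤ (PySem.Set.add s x).length := by
  simp only [PySem.Set.add]
  split
  · exact le_refl _
  · simp

theorem pv_length_le_foldl_add {α : Type} [BEq α] (l : List α) (s : PySem.Set α) :
    s.length ≤ (l.foldl PySem.Set.add s).length := by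
  induction l generalizing s with
  | nil => exact le_refl _
  | cons x xs ih => exact le_trans (pv_length_le_add s x) (ih _)

-- core: the loop with state 'some s' decides whether the cardinality of {s} ∪ elements stays ≤ 1
theorem pv_loop_some {s : List (String × Int × Int)}
    (l : List (Int × (List (String × Int × Int × (Int × Int × Int) × Int)))) :
    pvLoopA (some s) l
      = decide (PySem.Set.len ((l.map (fun m => pvProj m.2)).foldl PySem.Set.add [s]) ≤ 1) := by
  induction l generalizing s with
  | nil => simp [pvLoopA, PySem.Set.len]
  | cons p rest ih =>
      simp only [pvLoopA, List.map_cons, List.foldl_cons]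
      by_cases h : pvProj p.2 = s
      · simp only [h, ne_eq, not_true_eq_false, if_false]
        have hadd : PySem.Set.add [s] s = [s] := by
          simp [PySem.Set.add, PySem.Set.contains]
        rw [hadd, ih]
      · simp only [ne_eq, h, not_false_iff, if_true]
        have hadd : PySem.Set.add [s] (pvProj p.2) = [s, pvProj p.2] := by
          simp [PySem.Set.add, PySem.Set.contains, h]
        simp only [hadd]
        have hlen := pv_length_le_foldl_add (rest.map (fun m => pvProj m.2)) [s, pvProj p.2]
        simp only [List.length_cons, List.length_nil] at hlen
        symm
        rw [decide_eq_false_iff_not]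
        simp only [PySem.Set.len]
        omega

-- ===== VERDICT (by name: the statement is the Claim_ definition above) =====
theorem same_sphere_atoms_spec : Claim_equal_same_sphere_atoms := by
  intro mslist _
  unfold Spec_same_sphere_atoms same_sphere_atoms same_sphere_atoms_alt
  cases mslist with
  | nil => simp [pvLoopA, PySem.Set.ofList, PySem.Set.len]
  | cons p rest =>
      simp only [pvLoopA, List.map_cons]
      rw [pv_loop_some]
      rfl
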